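-- pv_equiv track=rewrite | github.com/VasilisG/LSB-steganography | LSB_steganography/LsbFileSteg.py | getExtensionInfo
-- ===== SOURCE A (Python) =====
-- bitsPerChar = 8
--
-- def getExtensionInfo(lsbPixels):
--     extension = []
--     currentIndex = 0
--     for p in range(0,len(lsbPixels),bitsPerChar):
--         letter = lsbPixels[p:p+bitsPerChar]
--         letter = "".join(letter)
--         if letter == "00000000":
--             currentIndex = currentIndex + bitsPerChar
--             break
--         extension.append("".join(letter))
--         currentIndex = currentIndex + bitsPerChar
--
--     extension = "".join([chr(int(e,2)) for e in extension])
--     return (extension, currentIndex)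
-- ===== SOURCE B (Python) =====
-- bitsPerChar = 8
--
-- def getExtensionInfo(lsbPixels):
--     chunks = ["".join(lsbPixels[p:p+bitsPerChar]) for p in range(0, len(lsbPixels), bitsPerChar)]
--     try:
--         idx = chunks.index("00000000")
--         nChunks = idx + 1
--     except ValueError:
--         idx = len(chunks)
--         nChunks = len(chunks)
--     extension = "".join(chr(int(e, 2)) for e in chunks[:idx])
--     return (extension, nChunks * bitsPerChar)
-- ===== Notes on version B (the rewrite author's own statement) =====
-- stated objective: alternative
-- what changed: A interleaves chunking, terminator detection and index bookkeeping in one break-out loop; B first materialises the list of 8-element chunks, locates the first '00000000' with list.index, decodes only the prefix before it, and computes the index by one multiplication instead of repeated +8.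
import Mathlib
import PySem

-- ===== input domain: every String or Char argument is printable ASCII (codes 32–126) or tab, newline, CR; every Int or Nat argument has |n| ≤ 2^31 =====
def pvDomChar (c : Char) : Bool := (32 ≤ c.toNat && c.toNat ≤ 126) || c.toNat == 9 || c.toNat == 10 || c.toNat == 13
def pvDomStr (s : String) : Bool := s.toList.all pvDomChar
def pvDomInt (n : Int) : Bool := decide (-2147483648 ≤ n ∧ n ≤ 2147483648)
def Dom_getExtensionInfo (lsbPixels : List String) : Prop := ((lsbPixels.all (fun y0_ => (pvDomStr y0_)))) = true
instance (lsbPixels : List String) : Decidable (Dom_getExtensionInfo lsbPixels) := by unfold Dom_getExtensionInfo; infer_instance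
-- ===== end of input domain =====

-- B replaces A's break-out accumulator loop by: build all 8-element chunks, find the first
-- "00000000" with list.index, decode the prefix, compute the index by one multiplication
-- (objective: alternative decomposition, same O(n) cost).

-- ===== PORT A =====
-- chr(int(e,2)): exact under Pre_ (int(e,2) succeeds and its value is a Unicode scalar value,
-- so Char.ofNat is Python's chr); the 'none' branch corresponds to Python's ValueError, excluded by Pre_.
def pvChr (e : String) : Char :=
  match PySem.Int.ofStrBase? e 2 with
  | some n => Char.ofNat n.toNat
  | none => Char.ofNat 0

-- the for-loop of A with its break: state = (extension list, currentIndex)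
def pvLoopA (xs : List String) : List Int → List String → Int → List String × Int
  | [], ext, ci => (ext, ci)
  | p :: ps, ext, ci =>
    let letter := PySem.Str.join "" (PySem.List.slice xs (some p) (some (p + 8)))
    if letter = "00000000" then (ext, ci + 8)
    else
      -- A's 'extension.append("".join(letter))': joining the characters of the string letter
      -- with "" gives letter itself
      pvLoopA xs ps (ext ++ [letter]) (ci + 8)

def getExtensionInfo (lsbPixels : List String) : String × Int :=
  let r := pvLoopA lsbPixels (PySem.List.pyRange 0 (PySem.List.len lsbPixels) 8) [] 0
  (PySem.Str.join "" (r.1.map (fun e => String.ofList [pvChr e])), r.2)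

-- ===== PORT B =====
def getExtensionInfo_alt (lsbPixels : List String) : String × Int :=
  let chunks := (PySem.List.pyRange 0 (PySem.List.len lsbPixels) 8).map
    (fun p => PySem.Str.join "" (PySem.List.slice lsbPixels (some p) (some (p + 8))))
  match PySem.List.index? chunks "00000000" with
  | some i => (PySem.Str.join "" ((chunks.take i).map (fun e => String.ofList [pvChr e])), ((i : Int) + 1) * 8)
  | none => (PySem.Str.join "" (chunks.map (fun e => String.ofList [pvChr e])), (chunks.length : Int) * 8)

-- ===== PRECONDITION & SPEC =====
-- the 8-element chunks A decodes (the ones before the first "00000000" chunk), described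
-- structurally for Pre_ (a shape condition on the input, not a run of either port)
def pvGroups8 : List String → List (List String)
  | [] => []
  | a :: b :: c :: d :: e :: f :: g :: h :: rest => [a, b, c, d, e, f, g, h] :: pvGroups8 rest
  | xs => [xs]

def pvDecodedChunks (lsbPixels : List String) : List (List Char) :=
  ((pvGroups8 lsbPixels).map (fun g => g.flatMap String.toList)).takeWhile
    (fun c => c ≠ ['0', '0', '0', '0', '0', '0', '0', '0'])
-- Pre_ excludes the inputs on which A raises a ValueError: a decoded chunk that is not a valid
-- base-2 int literal, or one whose value is negative or > 0x10FFFF (chr fails). It also excludes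
-- chunks decoding to lone surrogates (U+D800..U+DFFF), on which A returns a one-char surrogate
-- string that is not representable as a Lean Char.
def pvOkChunk (c : List Char) : Bool :=
  match PySem.Int.ofCharsBase? c 2 with
  | some n => decide (0 ≤ n ∧ (n < 55296 ∨ (57343 < n ∧ n < 1114112)))
  | none => false

def Pre_getExtensionInfo (lsbPixels : List String) : Prop :=
  (pvDecodedChunks lsbPixels).all pvOkChunk = true
instance (lsbPixels : List String) : Decidable (Pre_getExtensionInfo lsbPixels) := by
  unfold Pre_getExtensionInfo; infer_instance

def pvWitness_getExtensionInfo : List String := ["0", "1", "0", "0", "0", "0", "0", "1"]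

def Spec_getExtensionInfo (lsbPixels : List String) (out : String × Int) : Prop := out = getExtensionInfo_alt lsbPixels
instance (lsbPixels : List String) (out : String × Int) : Decidable (Spec_getExtensionInfo lsbPixels out) := by unfold Spec_getExtensionInfo; infer_instance

-- ===== CLAIM (what is proved, stated in full; the proofs are below) =====
def Claim_equal_getExtensionInfo : Prop := ∀ (lsbPixels : List String), Dom_getExtensionInfo lsbPixels → Pre_getExtensionInfo lsbPixels → Spec_getExtensionInfo lsbPixels (getExtensionInfo lsbPixels)

-- ===== LEMMAS AND PROOFS =====

-- A's loop over any list of positions equals B's chunk-list decomposition.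
theorem pvLoopA_eq (xs : List String) (ps : List Int) (ext : List String) (ci : Int) :
    pvLoopA xs ps ext ci =
      match PySem.List.index?
          (ps.map (fun p => PySem.Str.join "" (PySem.List.slice xs (some p) (some (p + 8))))) "00000000" with
      | some i =>
          (ext ++ (ps.map (fun p => PySem.Str.join "" (PySem.List.slice xs (some p) (some (p + 8))))).take i,
            ci + ((i : Int) + 1) * 8)
      | none =>
          (ext ++ ps.map (fun p => PySem.Str.join "" (PySem.List.slice xs (some p) (some (p + 8)))),
            ci + ((ps.length : Int)) * 8) := by
  induction ps generalizing ext ci with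
  | nil => simp [pvLoopA, PySem.List.index?]
  | cons p ps ih =>
    rw [List.map_cons]
    by_cases h : PySem.Str.join "" (PySem.List.slice xs (some p) (some (p + 8))) = "00000000"
    · rw [pvLoopA, if_pos h, h, PySem.List.index?_cons_self]
      simp
    · rw [pvLoopA, if_neg h, ih, PySem.List.index?_cons_of_ne _ h]
      cases hidx : PySem.List.index?
          (ps.map (fun p => PySem.Str.join "" (PySem.List.slice xs (some p) (some (p + 8))))) "00000000" with
      | none =>
        simp only [Option.map_none]
        refine Prod.ext ?_ ?_
        · simp
        · push_cast [List.length_cons]; ring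
      | some i =>
        simp only [Option.map_some]
        refine Prod.ext ?_ ?_
        · simp [List.take_succ_cons]
        · push_cast [List.length_cons]; ring

-- ===== VERDICT (by name: the statement is the Claim_ definition above) =====
theorem getExtensionInfo_spec : Claim_equal_getExtensionInfo := by
  intro xs _ _
  unfold Spec_getExtensionInfo getExtensionInfo getExtensionInfo_alt
  simp only []
  rw [pvLoopA_eq]
  cases hidx : PySem.List.index?
      ((PySem.List.pyRange 0 (PySem.List.len xs) 8).map
        (fun p => PySem.Str.join "" (PySem.List.slice xs (some p) (some (p + 8))))) "00000000" with
  | none => simp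
  | some i => simp
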